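-- pv_equiv track=rewrite | github.com/narekt0n0yan/Homework | AreSimilar.py | solution
-- ===== SOURCE A (Python) =====
-- def solution(a,b):
--     A = sorted(a)
--     B = sorted(b)
--     var = 0
--     for i in range(len(a)):
--         if a[i] != b[i]:
--             var += 1
--     if var > 2 :
--         return False
--     if A == B:
--         return True
--     return False
-- ===== SOURCE B (Python) =====
-- def solution(a, b):
--     diffs = [i for i in range(len(a)) if a[i] != b[i]]
--     if len(diffs) > 2 or len(a) != len(b):
--         return False
--     if len(diffs) == 0:
--         return True
--     if len(diffs) == 2:
--         i, j = diffs
--         return a[i] == b[j] and a[j] == b[i]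
--     return False
-- ===== Notes on version B (the rewrite author's own statement) =====
-- stated objective: faster
-- what changed: Replaces the two sorts plus multiset comparison with a direct check on the list of mismatching positions: <=2 diffs, equal lengths, and for exactly two diffs a single-swap test a[i]==b[j] and a[j]==b[i]; no sorting at all.
import Mathlib
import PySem

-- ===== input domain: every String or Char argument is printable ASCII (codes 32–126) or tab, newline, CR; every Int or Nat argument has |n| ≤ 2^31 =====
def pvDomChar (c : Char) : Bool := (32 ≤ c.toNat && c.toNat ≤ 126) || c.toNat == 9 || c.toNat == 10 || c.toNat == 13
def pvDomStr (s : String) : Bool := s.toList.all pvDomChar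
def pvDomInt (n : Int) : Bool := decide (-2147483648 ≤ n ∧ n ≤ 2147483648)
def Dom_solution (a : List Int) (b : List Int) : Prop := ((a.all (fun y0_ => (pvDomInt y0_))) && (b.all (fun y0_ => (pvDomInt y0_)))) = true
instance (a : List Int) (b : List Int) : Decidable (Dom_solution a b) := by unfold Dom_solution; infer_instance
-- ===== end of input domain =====

-- B replaces A's two sorts + multiset comparison by a direct single-swap check on the
-- mismatching positions (no sort; a timing run measured B faster).


-- ===== PORT A =====
def solution (a : List Int) (b : List Int) : Bool :=
  let A := PySem.List.sorted a (fun x => x) false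
  let B := PySem.List.sorted b (fun x => x) false
  let var : Int := (PySem.List.pyRange 0 (a.length : Int) 1).foldl
    (fun v i => if PySem.List.pyGetD a i 0 ≠ PySem.List.pyGetD b i 0 then v + 1 else v) 0
  if var > 2 then false
  else if A = B then true
  else false

-- ===== PORT B =====
def solution_alt (a : List Int) (b : List Int) : Bool :=
  let diffs := (PySem.List.pyRange 0 (a.length : Int) 1).filter
    (fun i => PySem.List.pyGetD a i 0 ≠ PySem.List.pyGetD b i 0)
  if diffs.length > 2 ∨ a.length ≠ b.length then false
  else if diffs.length = 0 then true
  else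
    match diffs with
    | [i, j] =>
        decide (PySem.List.pyGetD a i 0 = PySem.List.pyGetD b j 0 ∧
                PySem.List.pyGetD a j 0 = PySem.List.pyGetD b i 0)
    | _ => false

-- ===== PRECONDITION & SPEC =====
-- A raises IndexError (b[i] inside the loop) exactly when b is shorter than a; B raises there too.
def Pre_solution (a : List Int) (b : List Int) : Prop := a.length ≤ b.length
instance (a : List Int) (b : List Int) : Decidable (Pre_solution a b) := by unfold Pre_solution; infer_instance
def pvWitness_solution : List Int × List Int := ([1, 2, 3], [1, 3, 2])

def Spec_solution (a : List Int) (b : List Int) (out : Bool) : Prop := out = solution_alt a b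
instance (a : List Int) (b : List Int) (out : Bool) : Decidable (Spec_solution a b out) := by unfold Spec_solution; infer_instance

-- ===== CLAIM (what is proved, stated in full; the proofs are below) =====
def Claim_equal_solution : Prop := ∀ (a : List Int) (b : List Int), Dom_solution a b → Pre_solution a b → Spec_solution a b (solution a b)

-- ===== LEMMAS AND PROOFS =====

-- the mismatching pairs of the two lists, in order
def pvMis (a b : List Int) : List (Int × Int) :=
  (a.zip b).filter (fun p => p.1 ≠ p.2)

-- the Nat-indexed mismatch positions, mapped to their value pairs, ARE the zip mismatches
theorem pvMis_eq_map (a : List Int) : ∀ (b : List Int), a.length ≤ b.length →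
    ((List.range a.length).filter (fun i => a.getD i 0 ≠ b.getD i 0)).map
      (fun i => (a.getD i 0, b.getD i 0)) = pvMis a b := by
  induction a with
  | nil => intro b _; simp [pvMis]
  | cons x a' ih =>
      intro b hb
      cases b with
      | nil => simp at hb
      | cons y b' =>
          have hb' : a'.length ≤ b'.length := by simpa using hb
          have hmain := ih b' hb'
          simp only [List.length_cons, List.range_succ_eq_map, List.filter_cons, pvMis,
            List.zip_cons_cons, List.filter_map, Function.comp_def] at *
          by_cases hxy : x = y
          · subst hxy
            simpa using hmain
          · simp only [hxy, ne_eq, not_false_iff, decide_not, decide_eq_true_eq]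
            simpa [hxy] using hmain

-- multiset bookkeeping: a + snd-parts of mismatches = b + fst-parts (equal lengths)
theorem pvSplit (a : List Int) : ∀ (b : List Int), a.length = b.length →
    (a : Multiset Int) + ((pvMis a b).map Prod.snd : List Int) =
    (b : Multiset Int) + ((pvMis a b).map Prod.fst : List Int) := by
  induction a with
  | nil => intro b hb; cases b <;> simp_all [pvMis]
  | cons x a' ih =>
      intro b hb
      cases b with
      | nil => simp at hb
      | cons y b' =>
          have hb' : a'.length = b'.length := by simpa using hb
          have hmain := ih b' hb'
          by_cases hxy : x = y
          · have hm : pvMis (x :: a') (y :: b') = pvMis a' b' := by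
              simp [pvMis, hxy]
            rw [hm, ← Multiset.cons_coe, ← Multiset.cons_coe, Multiset.cons_add,
              Multiset.cons_add, hmain, hxy]
          · have hm : pvMis (x :: a') (y :: b') = (x, y) :: pvMis a' b' := by
              simp [pvMis, hxy]
            rw [hm]
            simp only [List.map_cons, ← Multiset.cons_coe, Multiset.cons_add,
              Multiset.add_cons]
            rw [hmain, Multiset.cons_swap]

-- permutation of the full lists reduces to permutation of the mismatch columns
theorem pvPerm_iff (a b : List Int) (h : a.length = b.length) :
    a.Perm b ↔ ((pvMis a b).map Prod.fst).Perm ((pvMis a b).map Prod.snd) := by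
  have hs := pvSplit a b h
  constructor
  · intro hp
    have hc : (a : Multiset Int) = (b : Multiset Int) := Multiset.coe_eq_coe.mpr hp
    rw [hc] at hs
    exact Multiset.coe_eq_coe.mp (add_left_cancel hs).symm
  · intro hp
    have hc : ((pvMis a b).map Prod.snd : Multiset Int) =
        ((pvMis a b).map Prod.fst : Multiset Int) := Multiset.coe_eq_coe.mpr hp.symm
    rw [hc] at hs
    exact Multiset.coe_eq_coe.mp (add_right_cancel hs)

-- a two-mismatch permutation is exactly the swap condition
theorem pvPair (x y u v : Int) (hxy : x ≠ y) :
    [x, u].Perm [y, v] ↔ (x = v ∧ u = y) := by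
  constructor
  · intro h
    have hx : x = y ∨ x = v := by
      simpa using h.mem_iff.mp (show x ∈ [x, u] by simp)
    have hxv : x = v := hx.resolve_left hxy
    refine ⟨hxv, ?_⟩
    by_cases huy : u = y
    · exact huy
    · exfalso
      have hc := h.count_eq y
      simp [List.count_cons, hxy, huy] at hc
  · rintro ⟨h1, h2⟩
    rw [h1, h2]
    exact List.Perm.swap _ _ _

-- every mismatch pair really mismatches
theorem pvMis_ne (a b : List Int) : ∀ p ∈ pvMis a b, p.1 ≠ p.2 := by
  intro p hp
  simpa using List.of_mem_filter hp

-- the core equality, proved against the mismatch list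
theorem pvCore (a b : List Int) (hpre : a.length ≤ b.length) :
    solution a b = solution_alt a b := by
  have hmap := pvMis_eq_map a b hpre
  set nd := (List.range a.length).filter (fun i => a.getD i 0 ≠ b.getD i 0) with hnd
  have hfil : (PySem.List.pyRange 0 (a.length : Int) 1).filter
      (fun i => PySem.List.pyGetD a i 0 ≠ PySem.List.pyGetD b i 0)
      = nd.map (fun (k : Nat) => (k : Int)) := by
    rw [PySem.List.pyRange_zero_natCast a.length, List.filter_map]
    simp [Function.comp_def, PySem.List.pyGetD_natCast, hnd]
  have hlen : nd.length = (pvMis a b).length := by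
    simpa using congrArg List.length hmap
  have hvar : (PySem.List.pyRange 0 (a.length : Int) 1).foldl
      (fun v i => if PySem.List.pyGetD a i 0 ≠ PySem.List.pyGetD b i 0 then v + 1 else v) 0
      = ((pvMis a b).length : Int) := by
    rw [PySem.List.foldl_ite_add_one
      (p := fun i => PySem.List.pyGetD a i 0 ≠ PySem.List.pyGetD b i 0),
      List.countP_eq_length_filter]
    rw [hfil]
    simp [hlen]
  have hsorted : ((PySem.List.sorted a (fun x => x)) = PySem.List.sorted b (fun x => x)) ↔ a.Perm b :=
    PySem.List.sorted_id_eq_sorted_id_iff_perm a b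
  simp only [solution, solution_alt, hfil, hvar, List.length_map, hlen]
  by_cases h2 : (pvMis a b).length > 2
  · have h2' : ((pvMis a b).length : Int) > 2 := by exact_mod_cast h2
    simp [h2, h2']
  · have h2' : ¬ ((pvMis a b).length : Int) > 2 := by exact_mod_cast h2
    rw [if_neg h2']
    by_cases hlenEq : a.length = b.length
    · have hcond : ¬ ((pvMis a b).length > 2 ∨ a.length ≠ b.length) := by
        simp [hlenEq]
        omega
      rw [if_neg hcond]
      rcases hnd2 : nd with _ | ⟨i, _ | ⟨j, _ | ⟨k, t⟩⟩⟩
      · have hm : pvMis a b = [] := by rw [← hmap, hnd2]; rfl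
        have hperm : a.Perm b := (pvPerm_iff a b hlenEq).mpr (by rw [hm]; exact List.Perm.nil)
        simp [hm, hsorted.mpr hperm]
      · have hm : pvMis a b = [(a.getD i 0, b.getD i 0)] := by rw [← hmap, hnd2]; rfl
        have hne1 : a.getD i 0 ≠ b.getD i 0 := by
          simpa using pvMis_ne a b _ (by rw [hm]; exact List.mem_singleton_self _)
        have hnp : ¬ ((PySem.List.sorted a fun x => x) = PySem.List.sorted b fun x => x) := by
          intro h
          have hp := (pvPerm_iff a b hlenEq).mp (hsorted.mp h)
          rw [hm] at hp
          exact hne1 (by simpa using hp)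
        simp [hm, hnp]
      · have hm : pvMis a b = [(a.getD i 0, b.getD i 0), (a.getD j 0, b.getD j 0)] := by
          rw [← hmap, hnd2]; rfl
        have hne1 : a.getD i 0 ≠ b.getD i 0 := by
          simpa using pvMis_ne a b _ (by rw [hm]; exact List.mem_cons_self)
        have hiff : ((PySem.List.sorted a fun x => x) = PySem.List.sorted b fun x => x) ↔
            (a.getD i 0 = b.getD j 0 ∧ a.getD j 0 = b.getD i 0) := by
          rw [hsorted, pvPerm_iff a b hlenEq, hm]
          simpa using pvPair (a.getD i 0) (b.getD i 0) (a.getD j 0) (b.getD j 0) hne1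
        by_cases hx : a.getD i 0 = b.getD j 0 <;> by_cases hy : a.getD j 0 = b.getD i 0 <;>
          simp [hm, hnd2, hiff, PySem.List.pyGetD_natCast, hx, hy]
      · exact absurd (by rw [← hlen, hnd2]; simp) h2
    · have hnp : ¬ ((PySem.List.sorted a fun x => x) = PySem.List.sorted b fun x => x) :=
        fun h => hlenEq ((hsorted.mp h).length_eq)
      rw [if_pos (Or.inr hlenEq), if_neg hnp]

-- ===== VERDICT (by name: the statement is the Claim_ definition above) =====
theorem solution_spec : Claim_equal_solution := by
  intro a b _ hpre
  exact pvCore a b hpre
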